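-- pv_equiv track=rewrite | github.com/Preethambhavirisetty/Dijkstra_Based-Map | backend/app/main.py | build_state_crossings
-- ===== SOURCE A (Python) =====
-- from typing import Dict, List
--
-- def build_state_crossings(states: List[str]):
--     if len(states) < 2:
--         return []
--     crossings = []
--     for i in range(len(states) - 1):
--         if states[i] != states[i + 1]:
--             crossings.append(f"{states[i]} -> {states[i + 1]}")
--     return crossings
-- ===== SOURCE B (Python) =====
-- from itertools import groupby
-- from typing import Dict, List
--
-- def build_state_crossings(states: List[str]):
--     keys = [k for k, _ in groupby(states)]
--     return [f"{a} -> {b}" for a, b in zip(keys, keys[1:])]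
-- ===== Notes on version B (the rewrite author's own statement) =====
-- stated objective: idiomatic
-- what changed: B first collapses consecutive equal states into run keys with itertools.groupby and then formats each consecutive pair of run keys, instead of scanning every adjacent index pair and filtering equal neighbours.
import Mathlib
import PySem

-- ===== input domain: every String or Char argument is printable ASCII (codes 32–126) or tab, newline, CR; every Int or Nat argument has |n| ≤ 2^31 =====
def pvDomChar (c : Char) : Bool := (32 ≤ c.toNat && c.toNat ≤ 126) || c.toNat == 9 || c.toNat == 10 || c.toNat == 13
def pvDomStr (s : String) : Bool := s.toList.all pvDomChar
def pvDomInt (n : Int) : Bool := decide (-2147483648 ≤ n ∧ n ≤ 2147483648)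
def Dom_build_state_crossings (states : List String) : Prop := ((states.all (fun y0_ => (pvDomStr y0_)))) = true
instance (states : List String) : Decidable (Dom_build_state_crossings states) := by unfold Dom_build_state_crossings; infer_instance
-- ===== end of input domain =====

-- B collapses consecutive equal states into run keys and formats consecutive run-key pairs (idiomatic decomposition); A filters adjacent index pairs.


-- ===== PORT A =====
def build_state_crossings (states : List String) : List String :=
  if states.length < 2 then []
  else
    (PySem.List.pyRange 0 ((states.length : Int) - 1) 1).foldl
      (fun acc i =>
        if PySem.List.pyGetD states i "" ≠ PySem.List.pyGetD states (i + 1) "" then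
          acc ++ [PySem.List.pyGetD states i "" ++ " -> " ++ PySem.List.pyGetD states (i + 1) ""]
        else acc) []

-- ===== PORT B =====
-- keys = [k for k, _ in groupby(states)] : first element of each run of consecutive equal values
def runKeys : List String → List String
  | [] => []
  | [a] => [a]
  | a :: b :: t => if a == b then runKeys (b :: t) else a :: runKeys (b :: t)

def build_state_crossings_alt (states : List String) : List String :=
  let keys := runKeys states
  (keys.zip keys.tail).map (fun p => p.1 ++ " -> " ++ p.2)

-- ===== PRECONDITION & SPEC =====
def Spec_build_state_crossings (states : List String) (out : List String) : Prop := out = build_state_crossings_alt states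
instance (states : List String) (out : List String) : Decidable (Spec_build_state_crossings states out) := by unfold Spec_build_state_crossings; infer_instance

-- ===== CLAIM (what is proved, stated in full; the proofs are below) =====
def Claim_equal_build_state_crossings : Prop := ∀ (states : List String), Dom_build_state_crossings states → Spec_build_state_crossings states (build_state_crossings states)

-- ===== LEMMAS AND PROOFS =====

-- the common normal form: adjacent differing pairs, formatted
def adjCross (xs : List String) : List String :=
  ((xs.zip xs.tail).filter (fun p => p.1 != p.2)).map (fun p => p.1 ++ " -> " ++ p.2)

-- the index-pair map of A equals the adjacent-pair zip
lemma pairs_range (xs : List String) :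
    (PySem.List.pyRange 0 ((xs.length : Int) - 1) 1).map
      (fun i => (PySem.List.pyGetD xs i "", PySem.List.pyGetD xs (i + 1) "")) = xs.zip xs.tail := by
  apply List.ext_getElem
  · simp [PySem.List.length_pyRange_one]
  · intro k h1 h2
    have hk : k < xs.length - 1 := by
      simpa [PySem.List.length_pyRange_one] using h1
    simp only [List.getElem_map, PySem.List.getElem_pyRange_one, List.getElem_zip,
      List.getElem_tail]
    have e1 : (0 : Int) + (k : Int) = ((k : Nat) : Int) := by omega
    have e2 : (k : Int) + 1 = (((k + 1 : Nat)) : Int) := by push_cast; ring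
    rw [e1, e2, PySem.List.pyGetD_natCast, PySem.List.pyGetD_natCast,
      List.getD_eq_getElem _ _ (by omega), List.getD_eq_getElem _ _ (by omega)]

lemma portA_eq_adjCross (xs : List String) : build_state_crossings xs = adjCross xs := by
  unfold build_state_crossings adjCross
  split_ifs with h
  · match xs, h with
    | [], _ => rfl
    | [a], _ => rfl
  · rw [PySem.List.foldl_append_ite
      (p := fun i => PySem.List.pyGetD xs i "" ≠ PySem.List.pyGetD xs (i + 1) "")
      (f := fun i => PySem.List.pyGetD xs i "" ++ " -> " ++ PySem.List.pyGetD xs (i + 1) "")]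
    rw [← pairs_range xs, List.filter_map, List.map_map]
    simp [Function.comp_def, bne, beq_eq_decide]

lemma runKeys_cons (b : String) (t : List String) :
    ∃ r, runKeys (b :: t) = b :: r := by
  induction t generalizing b with
  | nil => exact ⟨[], rfl⟩
  | cons c t' ih =>
    by_cases hbc : b = c
    · obtain ⟨r, hr⟩ := ih c
      exact ⟨r, by simp [runKeys, hbc, hr]⟩
    · have hb : (b == c) = false := beq_eq_false_iff_ne.mpr hbc
      exact ⟨runKeys (c :: t'), by simp [runKeys, hb]⟩

lemma portB_eq_adjCross (xs : List String) : build_state_crossings_alt xs = adjCross xs := by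
  induction xs with
  | nil => rfl
  | cons a t ih =>
    match t, ih with
    | [], _ => rfl
    | b :: t', ih =>
      by_cases hab : a = b
      · simp only [build_state_crossings_alt, runKeys, hab, beq_self_eq_true, if_true] at *
        rw [ih]
        simp [adjCross]
      · have hb : (a == b) = false := beq_eq_false_iff_ne.mpr hab
        obtain ⟨r, hr⟩ := runKeys_cons b t'
        simp only [build_state_crossings_alt, runKeys, hb, Bool.false_eq_true, if_false] at *
        rw [hr] at ih ⊢
        simp only [List.tail_cons, List.zip_cons_cons, List.map_cons] at ih ⊢
        rw [ih]
        simp [adjCross, hab]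

-- ===== VERDICT (by name: the statement is the Claim_ definition above) =====
theorem build_state_crossings_spec : Claim_equal_build_state_crossings := by
  intro states _
  unfold Spec_build_state_crossings
  rw [portA_eq_adjCross, portB_eq_adjCross]
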